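-- pv_equiv track=rewrite | github.com/bigeyesung/Leetcode | test6.py | nth_most_rare
-- ===== SOURCE A (Python) =====
-- def myfunc(ele):
--     return ele[1]
--
-- def nth_most_rare(elements, n):
--     """
--     :param elements: (list) List of integers.
--     :param n: (int) The n-th element function should return.
--     :returns: (int) The n-th most rare element in the elements list.
--     """
--     import collections
--     count = collections.Counter(elements)
--     arr = []
--     for key in count:
--         tmp = [key,count[key]]
--         arr.append(tmp)
--
--     arr.sort(key = myfunc)
--     return arr[n-1][0]
-- ===== SOURCE B (Python) =====
-- def nth_most_rare(elements, n):
--     """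
--     :param elements: (list) List of integers.
--     :param n: (int) The n-th element function should return.
--     :returns: (int) The n-th most rare element in the elements list.
--     """
--     import collections
--     count = collections.Counter(elements)
--     maxc = max(count.values(), default=0)
--     flat = []
--     for f in range(1, maxc + 1):
--         for key, c in count.items():
--             if c == f:
--                 flat.append(key)
--     return flat[n - 1]
-- ===== Notes on version B (the rewrite author's own statement) =====
-- stated objective: alternative
-- what changed: Replaces the comparison sort of (key,count) pairs by a counting-sort-style sweep: for each frequency level f = 1..max(count) collect (in Counter insertion order) the keys with count f, then index the concatenation; no sort is performed.
import Mathlib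
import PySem

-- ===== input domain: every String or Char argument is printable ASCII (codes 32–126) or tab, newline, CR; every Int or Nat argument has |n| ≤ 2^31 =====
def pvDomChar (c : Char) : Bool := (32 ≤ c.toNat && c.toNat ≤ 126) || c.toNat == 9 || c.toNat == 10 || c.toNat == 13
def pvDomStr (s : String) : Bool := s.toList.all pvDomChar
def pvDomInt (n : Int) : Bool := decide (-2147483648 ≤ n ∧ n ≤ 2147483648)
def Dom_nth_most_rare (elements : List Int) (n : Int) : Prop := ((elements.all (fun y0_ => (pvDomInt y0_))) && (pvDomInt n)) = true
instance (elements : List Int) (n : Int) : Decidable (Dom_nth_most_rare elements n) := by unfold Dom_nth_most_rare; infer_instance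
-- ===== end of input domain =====

-- B replaces A's stable comparison sort of (key, count) pairs by a counting-sort-style sweep over
-- frequency levels 1..max(count), collecting keys per level in Counter insertion order (alternative, not claimed faster).


-- ===== PORT A =====
-- myfunc(ele) = ele[1]; arr rows are always [key, count] (length 2), so the .getD 0 branch is dead code under Pre_
def myfunc (ele : List Int) : Int := (PySem.List.pyGet? ele 1).getD 0

def nth_most_rare (elements : List Int) (n : Int) : Int :=
  let count := PySem.Dict.counter elements
  let arr := count.keys.foldl (fun acc key => acc ++ [[key, count.getD key 0]]) ([] : List (List Int))
  let arr := PySem.List.sorted arr myfunc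
  -- arr[n-1][0]; out-of-range index = IndexError in Python, excluded by Pre_ (the .getD branches are dead code there)
  (PySem.List.pyGet? ((PySem.List.pyGet? arr (n - 1)).getD []) 0).getD 0

-- ===== PORT B =====
def nth_most_rare_alt (elements : List Int) (n : Int) : Int :=
  let count := PySem.Dict.counter elements
  let maxc := PySem.List.maxD count.values (fun v => v) 0
  let flat := (PySem.List.pyRange 1 (maxc + 1) 1).foldl (fun acc f =>
    count.items.foldl (fun acc2 p => if p.2 == f then acc2 ++ [p.1] else acc2) acc) ([] : List Int)
  -- flat[n-1]; IndexError excluded by Pre_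
  (PySem.List.pyGet? flat (n - 1)).getD 0

-- ===== PRECONDITION & SPEC =====
-- Pre_ excludes exactly the inputs where Python A raises IndexError: index n-1 out of range for the
-- list of distinct elements (in particular the empty list).
def Pre_nth_most_rare (elements : List Int) (n : Int) : Prop :=
  PySem.Raise.InRange (PySem.Set.ofList elements).length (n - 1)
instance (elements : List Int) (n : Int) : Decidable (Pre_nth_most_rare elements n) := by
  unfold Pre_nth_most_rare; infer_instance

def pvWitness_nth_most_rare : List Int × Int := ([3, 3, 5], 1)

def Spec_nth_most_rare (elements : List Int) (n : Int) (out : Int) : Prop := out = nth_most_rare_alt elements n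
instance (elements : List Int) (n : Int) (out : Int) : Decidable (Spec_nth_most_rare elements n out) := by unfold Spec_nth_most_rare; infer_instance

-- ===== CLAIM (what is proved, stated in full; the proofs are below) =====
def Claim_equal_nth_most_rare : Prop := ∀ (elements : List Int) (n : Int), Dom_nth_most_rare elements n → Pre_nth_most_rare elements n → Spec_nth_most_rare elements n (nth_most_rare elements n)

-- ===== LEMMAS AND PROOFS =====

-- insertBy walks past a prefix it does not go before, then inserts in front of a suffix it goes before
lemma insertBy_middle {α : Type} (before : α → α → Bool) (x : α) :
    ∀ (C D : List α), (∀ y ∈ C, before x y = false) → (∀ y ∈ D, before x y = true) →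
      PySem.List.insertBy before x (C ++ D) = C ++ [x] ++ D := by
  intro C
  induction C with
  | nil =>
    intro D _ hD
    cases D with
    | nil => rfl
    | cons d D' =>
      simp [PySem.List.insertBy, hD d (by simp)]
  | cons c C ih =>
    intro D hC hD
    have hc : before x c = false := hC c (by simp)
    simp only [List.cons_append, PySem.List.insertBy, hc]
    simp [ih D (fun y hy => hC y (by simp [hy])) hD]

-- insertBy passes over a prefix it does not go before
lemma insertBy_skip {α : Type} (before : α → α → Bool) (x : α) :
    ∀ (C D : List α), (∀ y ∈ C, before x y = false) →
      PySem.List.insertBy before x (C ++ D) = C ++ PySem.List.insertBy before x D := by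
  intro C
  induction C with
  | nil => intro D _; rfl
  | cons c C ih =>
    intro D hC
    have hc : before x c = false := hC c (by simp)
    simp only [List.cons_append, PySem.List.insertBy, hc]
    simp [ih D (fun y hy => hC y (by simp [hy]))]

-- pointwise congruence for flatMap over members
lemma flatMap_congr_mem {α β : Type} (l : List α) (f g : α → List β) (h : ∀ x ∈ l, f x = g x) :
    l.flatMap f = l.flatMap g := by
  induction l with
  | nil => rfl
  | cons a l ih =>
    simp only [List.flatMap_cons]
    rw [h a (by simp), ih (fun x hx => h x (by simp [hx]))]

-- inserting x into a bucket concatenation appends x at the end of its own bucket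
lemma insertBy_flatMap {α : Type} (key : α → Int) (x : α) :
    ∀ (vs : List Int), vs.Pairwise (· < ·) → key x ∈ vs → ∀ (l : List α),
      PySem.List.insertBy (fun a b => decide (key a < key b)) x
          (vs.flatMap (fun v => l.filter (fun y => key y == v)))
        = vs.flatMap (fun v => (l ++ [x]).filter (fun y => key y == v)) := by
  intro vs
  induction vs with
  | nil => intro _ hx; simp at hx
  | cons v vs ih =>
    intro hp hx l
    have hpv : ∀ u ∈ vs, v < u := by
      intro u hu; exact (List.pairwise_cons.mp hp).1 u hu
    have hfilt : ∀ u : Int, (l ++ [x]).filter (fun y => key y == u)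
        = l.filter (fun y => key y == u) ++ (if key x == u then [x] else []) := by
      intro u
      simp only [List.filter_append, List.filter_cons, List.filter_nil]
    by_cases hxv : key x = v
    · -- x belongs to the head bucket: skip it, insert before the rest
      have hC : ∀ y ∈ l.filter (fun y => key y == v), (fun a b => decide (key a < key b)) x y = false := by
        intro y hy
        have : key y = v := by simpa using (List.of_mem_filter hy)
        simp [this, hxv]
      have hD : ∀ y ∈ vs.flatMap (fun u => l.filter (fun z => key z == u)),
          (fun a b => decide (key a < key b)) x y = true := by
        intro y hy
        obtain ⟨u, hu, hyu⟩ := List.mem_flatMap.mp hy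
        have : key y = u := by simpa using (List.of_mem_filter hyu)
        simp [this, hxv]
        exact hpv u hu
      have := insertBy_middle (fun a b => decide (key a < key b)) x
        (l.filter (fun y => key y == v)) (vs.flatMap (fun u => l.filter (fun z => key z == u))) hC hD
      simp only [List.flatMap_cons] at *
      rw [this]
      have hrest : ∀ u ∈ vs, (l ++ [x]).filter (fun y => key y == u) = l.filter (fun y => key y == u) := by
        intro u hu
        have : key x ≠ u := by
          have := hpv u hu; omega
        simp [hfilt u, this]
      rw [flatMap_congr_mem vs _ _ hrest]
      simp [hfilt v, hxv]
    · -- x belongs to a later bucket: skip the head bucket entirely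
      have hx' : key x ∈ vs := by
        cases List.mem_cons.mp hx with
        | inl h => exact absurd h hxv
        | inr h => exact h
      have hC : ∀ y ∈ l.filter (fun y => key y == v), (fun a b => decide (key a < key b)) x y = false := by
        intro y hy
        have hyv : key y = v := by simpa using (List.of_mem_filter hy)
        have : v < key x := hpv _ hx'
        simp [hyv]; omega
      have hne : key x ≠ v := hxv
      simp only [List.flatMap_cons]
      rw [insertBy_skip (fun a b => decide (key a < key b)) x _ _ hC]
      rw [ih (List.pairwise_cons.mp hp).2 hx' l]
      simp [hfilt v, hne]

lemma sorted_eq_flatMap {α : Type} (key : α → Int) (vs : List Int) (hvs : vs.Pairwise (· < ·)) :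
    ∀ l : List α, (∀ x ∈ l, key x ∈ vs) →
      PySem.List.sorted l key = vs.flatMap (fun v => l.filter (fun x => key x == v)) := by
  intro l
  induction l using List.reverseRecOn with
  | nil => intro _; simp [PySem.List.sorted_eq_foldl_insertBy]
  | append_singleton l x ih =>
    intro h
    rw [PySem.List.sorted_eq_foldl_insertBy, List.foldl_append, ← PySem.List.sorted_eq_foldl_insertBy,
      ih (fun y hy => h y (by simp [hy]))]
    simp only [List.foldl_cons, List.foldl_nil]
    exact insertBy_flatMap key x vs hvs (h x (by simp)) l

-- xs[i] commutes with map
lemma pyGet?_map {α β : Type} (g : α → β) (xs : List α) (i : Int) :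
    PySem.List.pyGet? (xs.map g) i = (PySem.List.pyGet? xs i).map g := by
  simp only [PySem.List.pyGet?, List.length_map]
  cases PySem.List.pyIdx? xs.length i with
  | none => rfl
  | some k => simp

-- ===== VERDICT (by name: the statement is the Claim_ definition above) =====
theorem nth_most_rare_spec : Claim_equal_nth_most_rare := by
  intro elements n _ _
  unfold Spec_nth_most_rare nth_most_rare nth_most_rare_alt
  simp only []
  set S := PySem.Set.ofList elements with hS
  set cnt := PySem.Dict.counter elements with hcnt
  set maxc := PySem.List.maxD cnt.values (fun v => v) 0 with hmaxc
  set vs := PySem.List.pyRange 1 (maxc + 1) 1 with hvs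
  have hitems : cnt.items = S.map (fun k => (k, (elements.count k : Int))) :=
    PySem.Dict.items_counter elements
  -- A's unsorted arr is the items rendered as two-element lists
  have harr : cnt.keys.foldl (fun acc key => acc ++ [[key, cnt.getD key 0]]) ([] : List (List Int))
      = cnt.items.map (fun p => [p.1, p.2]) := by
    rw [PySem.List.foldl_append_singleton_eq_map, List.nil_append, PySem.Dict.keys_counter, hitems]
    rw [List.map_map]
    apply List.map_congr_left
    intro k _
    rw [hcnt, PySem.Dict.getD_counter]
    rfl
  -- every item's count lies in 1..maxc
  have hmem : ∀ p ∈ cnt.items, p.2 ∈ vs := by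
    intro p hp
    rw [hitems] at hp
    obtain ⟨k, hk, rfl⟩ := List.mem_map.mp hp
    have hkel : k ∈ elements := (PySem.Set.mem_ofList elements k).mp hk
    have h1 : 1 ≤ elements.count k := List.one_le_count_iff.mpr hkel
    have hval : ((elements.count k : Int)) ∈ cnt.values := by
      have : (k, (elements.count k : Int)) ∈ cnt.items := by
        rw [hitems]; exact List.mem_map.mpr ⟨k, hk, rfl⟩
      simp only [PySem.Dict.values]
      exact List.mem_map.mpr ⟨_, this, rfl⟩
    have hle : (elements.count k : Int) ≤ maxc := by
      rcases hmax : PySem.List.max? cnt.values (fun v => v) with _ | m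
      · rw [PySem.List.max?_eq_none_iff] at hmax
        rw [hmax] at hval; simp at hval
      · have := PySem.List.max?_isMax hmax _ hval
        simpa [hmaxc, PySem.List.maxD, hmax] using this
    rw [hvs, PySem.List.mem_pyRange_one]
    have h1' : (1 : Int) ≤ ((elements.count k : Nat) : Int) := by exact_mod_cast h1
    refine ⟨h1', ?_⟩
    show (elements.count k : Int) < maxc + 1
    omega
  -- A's sorted arr = bucket concatenation of the items, rendered as two-element lists
  have hkeyrow : ∀ p : Int × Int, myfunc [p.1, p.2] = p.2 := by
    intro p; simp [myfunc, PySem.List.pyGet?, PySem.List.pyIdx?]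
  have hkeys : ∀ e ∈ cnt.items.map (fun p => [p.1, p.2]), myfunc e ∈ vs := by
    intro e he
    obtain ⟨p, hp, rfl⟩ := List.mem_map.mp he
    rw [hkeyrow p]
    exact hmem p hp
  have hsorted : PySem.List.sorted (cnt.items.map (fun p => [p.1, p.2])) myfunc
      = (vs.flatMap (fun v => cnt.items.filter (fun p => p.2 == v))).map (fun p => [p.1, p.2]) := by
    rw [sorted_eq_flatMap myfunc vs
      (by rw [hvs]; exact PySem.List.pairwise_lt_pyRange_one 1 (maxc+1)) _ hkeys]
    rw [List.map_flatMap]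
    apply flatMap_congr_mem
    intro v _
    rw [List.filter_map]
    have hpq : ∀ p ∈ cnt.items, ((fun e => myfunc e == v) ∘ fun p => [p.1, p.2]) p = (p.2 == v) := by
      intro p _
      simp only [Function.comp_apply, hkeyrow p]
    rw [List.filter_congr hpq]
  -- B's flat list is the bucket concatenation of the items' keys
  have hflat : vs.foldl (fun acc f =>
        cnt.items.foldl (fun acc2 p => if p.2 == f then acc2 ++ [p.1] else acc2) acc) ([] : List Int)
      = (vs.flatMap (fun v => cnt.items.filter (fun p => p.2 == v))).map (fun p => p.1) := by
    rw [PySem.List.foldl_congr_mem vs _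
      (fun acc f => acc ++ (cnt.items.filter (fun p => p.2 == f)).map (fun p => p.1)) []
      (fun acc f _ => PySem.List.foldl_append_if (fun p => p.2 == f) (fun p => p.1) cnt.items acc)]
    rw [PySem.List.foldl_append_eq_flatMap, List.nil_append, List.map_flatMap]
  rw [harr, hsorted, hflat, pyGet?_map, pyGet?_map]
  cases PySem.List.pyGet? (vs.flatMap (fun v => cnt.items.filter (fun p => p.2 == v))) (n - 1) with
  | none => rfl
  | some p => simp [PySem.List.pyGet?, PySem.List.pyIdx?]
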